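-- pv_equiv track=rewrite | github.com/anshsingh4455/StudyBuddyAI | utils/image_fetcher.py | detect_image_request
-- ===== SOURCE A (Python) =====
-- def detect_image_request(user_text: str) -> bool:
--     """
--     Detect if the user is asking for an image.
--
--     Returns True if user message contains image-related keywords.
--     """
--     if not user_text:
--         return False
--
--     text_lower = user_text.lower()
--
--     image_keywords = [
--         "show me an image",
--         "show me a picture",
--         "show me a photo",
--         "give me an image",
--         "give me a picture",
--         "give me a photo",
--         "display an image",
--         "display a picture",
--         "display a photo",
--         "image of",
--         "picture of",
--         "photo of",
--         "show image",
--         "show picture",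
--         "show photo",
--         "provide me image",
--         "provide me a image",
--         "send me image",
--         "send me a image",
--     ]
--
--     return any(keyword in text_lower for keyword in image_keywords)
-- ===== SOURCE B (Python) =====
-- import re
--
-- _IMAGE_KEYWORDS = [
--     "show me an image",
--     "show me a picture",
--     "show me a photo",
--     "give me an image",
--     "give me a picture",
--     "give me a photo",
--     "display an image",
--     "display a picture",
--     "display a photo",
--     "image of",
--     "picture of",
--     "photo of",
--     "show image",
--     "show picture",
--     "show photo",
--     "provide me image",
--     "provide me a image",
--     "send me image",
--     "send me a image",
-- ]
--
-- _PATTERN = re.compile("|".join(_IMAGE_KEYWORDS))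
--
--
-- def detect_image_request(user_text: str) -> bool:
--     """Detect if the user is asking for an image (single regex scan)."""
--     return _PATTERN.search(user_text.lower()) is not None
-- ===== Notes on version B (the rewrite author's own statement) =====
-- stated objective: idiomatic
-- what changed: B precompiles one alternation regex from the keyword list and decides the request with a single left-to-right automaton scan of the lowered text, instead of A's one substring search per keyword.
import Mathlib
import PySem

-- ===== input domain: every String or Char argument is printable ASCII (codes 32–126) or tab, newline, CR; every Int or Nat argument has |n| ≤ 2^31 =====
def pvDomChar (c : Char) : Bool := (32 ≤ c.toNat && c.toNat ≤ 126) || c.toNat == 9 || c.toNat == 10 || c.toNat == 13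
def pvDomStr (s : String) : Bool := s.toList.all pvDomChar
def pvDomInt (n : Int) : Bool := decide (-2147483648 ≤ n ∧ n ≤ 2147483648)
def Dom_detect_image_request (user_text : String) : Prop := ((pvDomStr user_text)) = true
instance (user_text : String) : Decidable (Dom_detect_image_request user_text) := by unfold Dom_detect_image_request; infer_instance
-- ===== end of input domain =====

-- B re-implements A with one combined alternation regex scanned once over the lowered text (idiomatic), instead of one substring search per keyword; return values are identical.

-- the shared keyword data (plain text, identical in Source A and Source B)
def imageKeywords : List String :=
  [ "show me an image", "show me a picture", "show me a photo",
    "give me an image", "give me a picture", "give me a photo",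
    "display an image", "display a picture", "display a photo",
    "image of", "picture of", "photo of",
    "show image", "show picture", "show photo",
    "provide me image", "provide me a image",
    "send me image", "send me a image" ]

-- ===== PORT A =====
-- A: guard on empty string, lower once, then one 'keyword in text' substring search per keyword.
def detect_image_request (user_text : String) : Bool :=
  if user_text == "" then false
  else
    let text_lower := PySem.Str.lower user_text
    imageKeywords.any (fun keyword => PySem.Str.isIn keyword text_lower)

-- ===== PORT B =====
-- B: the compiled alternation regex; re.search tries each position of the text left to right,
-- succeeding as soon as some alternative matches as a prefix of the remaining suffix.
-- Modelled step for step as that single scan (exact for these plain-text, nonempty patterns).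
def regexAltSearch (pats : List (List Char)) : List Char → Bool
  | [] => false
  | c :: rest =>
      if pats.any (fun p => List.isPrefixOf p (c :: rest)) then true
      else regexAltSearch pats rest

def detect_image_request_alt (user_text : String) : Bool :=
  regexAltSearch (imageKeywords.map String.toList) (PySem.Chars.lower user_text.toList)

-- ===== PRECONDITION & SPEC =====
def Spec_detect_image_request (user_text : String) (out : Bool) : Prop := out = detect_image_request_alt user_text
instance (user_text : String) (out : Bool) : Decidable (Spec_detect_image_request user_text out) := by unfold Spec_detect_image_request; infer_instance

-- ===== CLAIM (what is proved, stated in full; the proofs are below) =====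
def Claim_equal_detect_image_request : Prop := ∀ (user_text : String), Dom_detect_image_request user_text → Spec_detect_image_request user_text (detect_image_request user_text)

-- ===== LEMMAS AND PROOFS =====

-- the position-by-position scan of nonempty patterns decides exactly 'some pattern occurs as a substring'
theorem regexAltSearch_eq_any_isIn (pats : List (List Char)) (h : ∀ p ∈ pats, p ≠ [])
    (s : List Char) :
    regexAltSearch pats s = pats.any (fun p => PySem.Chars.isIn p s) := by
  induction s with
  | nil =>
      simp only [regexAltSearch]
      symm
      simp only [List.any_eq_false]
      intro p hp
      rw [PySem.Chars.isIn_iff_infix]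
      intro hinf
      exact h p hp (List.eq_nil_of_infix_nil hinf)
  | cons c rest ih =>
      simp only [regexAltSearch]
      by_cases hpre : pats.any (fun p => List.isPrefixOf p (c :: rest)) = true
      · simp only [hpre, if_true]
        symm
        rw [List.any_eq_true] at hpre ⊢
        obtain ⟨p, hp, hpp⟩ := hpre
        refine ⟨p, hp, ?_⟩
        rw [← PySem.Chars.exists_prefix_drop_iff_isIn]
        exact ⟨0, by simpa using List.isPrefixOf_iff_prefix.mp hpp⟩
      · rw [Bool.not_eq_true] at hpre
        rw [hpre, if_neg (by simp), ih]
        rw [List.any_eq_false] at hpre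
        apply Bool.eq_iff_iff.mpr
        simp only [List.any_eq_true]
        constructor
        · rintro ⟨p, hp, hin⟩
          refine ⟨p, hp, ?_⟩
          rw [← PySem.Chars.exists_prefix_drop_iff_isIn] at hin ⊢
          obtain ⟨j, hj⟩ := hin
          exact ⟨j + 1, by simpa using hj⟩
        · rintro ⟨p, hp, hin⟩
          refine ⟨p, hp, ?_⟩
          rw [← PySem.Chars.exists_prefix_drop_iff_isIn] at hin ⊢
          obtain ⟨j, hj⟩ := hin
          cases j with
          | zero =>
              exact absurd (List.isPrefixOf_iff_prefix.mpr (by simpa using hj))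
                (by simpa using hpre p hp)
          | succ j => exact ⟨j, by simpa using hj⟩

theorem imageKeywords_ne_nil : ∀ p ∈ imageKeywords.map String.toList, p ≠ [] := by decide

-- ===== VERDICT (by name: the statement is the Claim_ definition above) =====
theorem detect_image_request_spec : Claim_equal_detect_image_request := by
  intro user_text _
  unfold Spec_detect_image_request detect_image_request detect_image_request_alt
  rw [regexAltSearch_eq_any_isIn _ imageKeywords_ne_nil]
  by_cases hempty : user_text = ""
  · subst hempty; decide
  · have : (user_text == "") = false := by simpa using hempty
    rw [this, if_neg (by simp)]
    simp [List.any_map, PySem.Str.isIn_eq, PySem.Str.lower, Function.comp_def]
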